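-- pv_equiv track=rewrite | github.com/LVtomatoJ/music-to-video | src/test.py | get_sorted_indexes
-- ===== SOURCE A (Python) =====
-- def get_sorted_indexes(nums):
--     index_dict = {}
--     for i, num in enumerate(nums):
--         if num in index_dict:
--             index_dict[num].append(i)
--         else:
--             index_dict[num] = [i]
--
--     sorted_indexes = []
--     for num in sorted(index_dict.keys()):
--         sorted_indexes.extend(index_dict[num])
--
--     return sorted_indexes
-- ===== SOURCE B (Python) =====
-- def get_sorted_indexes(nums):
--     return sorted(range(len(nums)), key=lambda i: nums[i])
-- ===== Notes on version B (the rewrite author's own statement) =====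
-- stated objective: idiomatic
-- what changed: Replaces the value->index-list dict grouping plus key-sort-and-concatenate with a single stable sort of the index range keyed by the value at each index.
import Mathlib
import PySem

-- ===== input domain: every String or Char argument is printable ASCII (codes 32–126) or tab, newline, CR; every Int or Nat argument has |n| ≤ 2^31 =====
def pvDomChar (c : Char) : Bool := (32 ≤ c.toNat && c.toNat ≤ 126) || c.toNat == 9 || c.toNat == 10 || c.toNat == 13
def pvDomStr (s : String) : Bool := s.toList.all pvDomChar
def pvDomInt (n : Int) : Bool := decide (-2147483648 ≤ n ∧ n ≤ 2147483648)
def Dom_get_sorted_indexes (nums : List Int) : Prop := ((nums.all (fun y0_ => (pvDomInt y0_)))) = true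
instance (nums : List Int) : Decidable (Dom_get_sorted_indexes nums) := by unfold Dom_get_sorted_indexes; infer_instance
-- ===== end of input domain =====

-- B replaces A's dict grouping plus key-sort-and-concatenate with one stable sort of the index range keyed by the value there (idiomatic).

-- ===== PORT A =====
def get_sorted_indexes (nums : List Int) : List Int :=
  let index_dict : PySem.Dict Int (List Int) :=
    (PySem.List.enumerate nums 0).foldl
      (fun d p => if d.contains p.2 then d.modify p.2 [] (fun l => l ++ [p.1])
                  else d.insert p.2 [p.1])
      PySem.Dict.empty
  (PySem.List.sorted index_dict.keys (fun x => x) false).foldl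
    (fun acc num => acc ++ index_dict.getD num []) []

-- ===== PORT B =====
-- 'nums[i]' for i drawn from range(len(nums)) is always in range, so pyGetD with a dummy default is exact.
def get_sorted_indexes_alt (nums : List Int) : List Int :=
  PySem.List.sorted (PySem.List.pyRange 0 (nums.length : Int) 1)
    (fun i => PySem.List.pyGetD nums i 0) false

-- ===== PRECONDITION & SPEC =====
def Spec_get_sorted_indexes (nums : List Int) (out : List Int) : Prop := out = get_sorted_indexes_alt nums
instance (nums : List Int) (out : List Int) : Decidable (Spec_get_sorted_indexes nums out) := by unfold Spec_get_sorted_indexes; infer_instance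

-- ===== CLAIM (what is proved, stated in full; the proofs are below) =====
def Claim_equal_get_sorted_indexes : Prop := ∀ (nums : List Int), Dom_get_sorted_indexes nums → Spec_get_sorted_indexes nums (get_sorted_indexes nums)

-- ===== LEMMAS AND PROOFS =====

-- The lexicographic "value then position" order both results are arranged in.
def pvLex (f : Int → Int) (a b : Int) : Prop := f a < f b ∨ (f a = f b ∧ a ≤ b)

-- Stability of PySem's insertion sort: an element larger (as a position) than everything
-- present lands after all equal keys, keeping the list pvLex-ordered.
theorem pv_insertBy_pairwise (f : Int → Int) (x : Int) (acc : List Int)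
    (hacc : acc.Pairwise (pvLex f)) (hlt : ∀ y ∈ acc, y < x) :
    (PySem.List.insertBy (fun a b => decide (f a < f b)) x acc).Pairwise (pvLex f) := by
  induction acc with
  | nil => simp [PySem.List.insertBy]
  | cons y ys ih =>
    rw [List.pairwise_cons] at hacc
    obtain ⟨hy, hys⟩ := hacc
    by_cases hfx : f x < f y
    · rw [show PySem.List.insertBy (fun a b => decide (f a < f b)) x (y :: ys)
          = x :: y :: ys by simp [PySem.List.insertBy, hfx]]
      refine List.pairwise_cons.2 ⟨?_, List.pairwise_cons.2 ⟨hy, hys⟩⟩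
      intro z hz
      rcases List.mem_cons.1 hz with hz | hz
      · subst hz; exact Or.inl hfx
      · have := hy z hz
        rcases this with h | h
        · exact Or.inl (lt_trans hfx h)
        · exact Or.inl (by omega)
    · rw [show PySem.List.insertBy (fun a b => decide (f a < f b)) x (y :: ys)
          = y :: PySem.List.insertBy (fun a b => decide (f a < f b)) x ys by
            simp [PySem.List.insertBy, hfx]]
      refine List.pairwise_cons.2 ⟨?_, ih hys (fun z hz => hlt z (List.mem_cons_of_mem _ hz))⟩
      intro z hz
      rw [PySem.List.mem_insertBy] at hz
      rcases hz with hz | hz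
      · subst hz
        rcases lt_or_eq_of_le (not_lt.1 hfx) with h | h
        · exact Or.inl h
        · exact Or.inr ⟨h, le_of_lt (hlt y (List.mem_cons_self))⟩
      · exact hy z hz

-- Sorting a strictly increasing position list with any key yields the pvLex order (stability).
theorem pv_sorted_pairwise_lex (xs : List Int) (f : Int → Int)
    (h : xs.Pairwise (· < ·)) :
    (PySem.List.sorted xs f false).Pairwise (pvLex f) := by
  rw [PySem.List.sorted_eq_foldl_insertBy]
  suffices H : ∀ (xs : List Int) (acc : List Int), acc.Pairwise (pvLex f) →
      (∀ y ∈ acc, ∀ x ∈ xs, y < x) → xs.Pairwise (· < ·) →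
      (xs.foldl (fun acc x => PySem.List.insertBy (fun a b => decide (f a < f b)) x acc) acc).Pairwise (pvLex f) by
    exact H xs [] (by simp) (by simp) h
  intro xs
  induction xs with
  | nil => intro acc hacc _ _; simpa using hacc
  | cons x t ih =>
    intro acc hacc hcross hp
    rw [List.pairwise_cons] at hp
    simp only [List.foldl_cons]
    apply ih
    · exact pv_insertBy_pairwise f x acc hacc (fun y hy => hcross y hy x List.mem_cons_self)
    · intro y hy z hz
      rw [PySem.List.mem_insertBy] at hy
      rcases hy with hy | hy
      · subst hy; exact hp.1 z hz
      · exact hcross y hy z (List.mem_cons_of_mem _ hz)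
    · exact hp.2

-- enumerate(xs, s) is the index range paired with the value at each (shifted) index.
theorem pv_enumerate_eq (xs : List Int) : ∀ (s : Int),
    PySem.List.enumerate xs s =
      (PySem.List.pyRange s (s + (xs.length : Int)) 1).map
        (fun i => (i, PySem.List.pyGetD xs (i - s) 0)) := by
  induction xs with
  | nil => intro s; simp [PySem.List.enumerate, PySem.List.pyRange_one_eq_nil]
  | cons x t ih =>
    intro s
    rw [PySem.List.enumerate_cons,
        PySem.List.pyRange_one_cons (by simp only [List.length_cons]; push_cast; omega),
        List.map_cons]
    congr 1
    · simp [PySem.List.pyGetD_zero_cons]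
    · rw [ih (s + 1)]
      have hb : s + ((x :: t).length : Int) = (s + 1) + (t.length : Int) := by
        simp only [List.length_cons]; push_cast; omega
      rw [hb]
      apply List.map_congr_left
      intro i hi
      rw [PySem.List.mem_pyRange_one] at hi
      congr 1
      rw [PySem.List.pyGetD_eq_getElem _ _ (by omega) (by omega),
          PySem.List.pyGetD_eq_getElem _ _ (by omega) (by simp only [List.length_cons]; push_cast; omega)]
      have h1 : (i - s).toNat = (i - (s+1)).toNat + 1 := by omega
      simp only [h1, List.getElem_cons_succ]

-- Concatenating the per-value filters over a duplicate-free value cover is a permutation.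
theorem pv_flatMap_filter_perm (g : Int → Int) :
    ∀ (vs : List Int) (l : List Int), vs.Nodup → (∀ i ∈ l, g i ∈ vs) →
    (vs.flatMap (fun v => l.filter (fun i => g i == v))).Perm l := by
  intro vs
  induction vs with
  | nil =>
    intro l _ hcov
    have : l = [] := by
      cases l with
      | nil => rfl
      | cons a t => exact absurd (hcov a List.mem_cons_self) (by simp)
    simp [this]
  | cons v vs' ih =>
    intro l hnd hcov
    rw [List.flatMap_cons]
    have hnd' := (List.nodup_cons.1 hnd)
    have htail : ∀ v' ∈ vs', l.filter (fun i => g i == v') =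
        (l.filter (fun i => !(g i == v))).filter (fun i => g i == v') := by
      intro v' hv'
      rw [List.filter_filter]
      apply List.filter_congr
      intro i _
      by_cases h : g i = v'
      · have hne : g i ≠ v := by rintro rfl; exact hnd'.1 (h ▸ hv')
        have : v' ≠ v := by rintro rfl; exact hne h
        simp [h, this]
      · simp [h]
    rw [List.flatMap_congr htail]
    have hperm := ih (l.filter (fun i => !(g i == v))) hnd'.2 (by
      intro i hi
      rw [List.mem_filter] at hi
      have := hcov i hi.1
      rcases List.mem_cons.1 this with h | h
      · exact absurd h (by simpa using hi.2)
      · exact h)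
    exact (List.Perm.append_left _ hperm).trans (List.filter_append_perm _ l)

-- A's output in closed form: index buckets concatenated over the sorted distinct values.
theorem pv_A_eq_flatMap (nums : List Int) :
    get_sorted_indexes nums =
      (PySem.List.sorted (PySem.Set.ofList nums) (fun x => x) false).flatMap
        (fun v => (PySem.List.pyRange 0 (nums.length : Int) 1).filter
          (fun i => PySem.List.pyGetD nums i 0 == v)) := by
  have hbranch : ∀ (d : PySem.Dict Int (List Int)), ∀ p ∈ PySem.List.enumerate nums 0,
      (if d.contains p.2 then d.modify p.2 [] (fun l => l ++ [p.1]) else d.insert p.2 [p.1])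
        = d.modify p.2 [] (fun l => l ++ [p.1]) := by
    intro d p _
    by_cases h : d.contains p.2
    · simp [h]
    · rw [if_neg (by simpa using h)]
      simp [PySem.Dict.modify, PySem.Dict.getD_of_not_contains d [] (by simpa using h)]
  have hD : (PySem.List.enumerate nums 0).foldl
      (fun d p => if d.contains p.2 then d.modify p.2 [] (fun l => l ++ [p.1])
                  else d.insert p.2 [p.1]) PySem.Dict.empty
      = ((PySem.List.pyRange 0 (nums.length : Int) 1).map
          (fun i => (PySem.List.pyGetD nums i 0, i))).foldl
          (fun d p => d.modify p.1 [] (fun l => l ++ [p.2])) PySem.Dict.empty := by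
    rw [PySem.List.foldl_congr_mem _ _ _ _ hbranch, pv_enumerate_eq nums 0]
    simp only [zero_add, sub_zero]
    rw [List.foldl_map, List.foldl_map]
  show (PySem.List.sorted ((PySem.List.enumerate nums 0).foldl
      (fun d p => if d.contains p.2 then d.modify p.2 [] (fun l => l ++ [p.1])
                  else d.insert p.2 [p.1]) PySem.Dict.empty).keys (fun x => x) false).foldl
    (fun acc num => acc ++ ((PySem.List.enumerate nums 0).foldl
      (fun d p => if d.contains p.2 then d.modify p.2 [] (fun l => l ++ [p.1])
                  else d.insert p.2 [p.1]) PySem.Dict.empty).getD num []) [] = _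
  rw [hD]
  have hkeys : (((PySem.List.pyRange 0 (nums.length : Int) 1).map
          (fun i => (PySem.List.pyGetD nums i 0, i))).foldl
          (fun d p => d.modify p.1 [] (fun l => l ++ [p.2])) PySem.Dict.empty).keys
      = PySem.Set.ofList nums := by
    rw [List.foldl_map]
    rw [PySem.Dict.keys_foldl_modify_key _ (fun i => (PySem.List.pyGetD nums i 0, i).1)
        [] (fun d i => fun l => l ++ [(PySem.List.pyGetD nums i 0, i).2]) PySem.Dict.empty]
    simp only [PySem.Dict.keys_empty]
    rw [show (PySem.List.pyRange 0 (nums.length : Int) 1).map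
          (fun i => (PySem.List.pyGetD nums i 0, i).1) = nums from
        PySem.List.map_pyGetD_pyRange_zero' nums 0]
    rfl
  rw [hkeys]
  have hgetD : ∀ v, (((PySem.List.pyRange 0 (nums.length : Int) 1).map
          (fun i => (PySem.List.pyGetD nums i 0, i))).foldl
          (fun d p => d.modify p.1 [] (fun l => l ++ [p.2])) PySem.Dict.empty).getD v []
      = (PySem.List.pyRange 0 (nums.length : Int) 1).filter
          (fun i => PySem.List.pyGetD nums i 0 == v) := by
    intro v
    rw [PySem.Dict.getD_foldl_modify_append _ PySem.Dict.empty v]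
    rw [PySem.Dict.getD_of_not_contains _ [] (by simp [PySem.Dict.contains_empty])]
    rw [List.filter_map, List.map_map]
    simp [Function.comp_def]
  rw [PySem.List.foldl_append_eq_flatMap]
  rw [List.nil_append]
  exact List.flatMap_congr (fun v _ => hgetD v)

-- A's output is in pvLex order.
theorem pv_A_pairwise (nums : List Int) :
    (get_sorted_indexes nums).Pairwise (pvLex (fun i => PySem.List.pyGetD nums i 0)) := by
  rw [pv_A_eq_flatMap]
  rw [List.pairwise_flatMap]
  constructor
  · intro v _
    have h1 : ((PySem.List.pyRange 0 (nums.length : Int) 1).filter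
        (fun i => PySem.List.pyGetD nums i 0 == v)).Pairwise (· < ·) :=
      (PySem.List.pairwise_lt_pyRange_one 0 (nums.length : Int)).filter _
    refine h1.imp_of_mem ?_
    intro a b ha hb hab
    rw [List.mem_filter] at ha hb
    refine Or.inr ⟨?_, le_of_lt hab⟩
    show PySem.List.pyGetD nums a 0 = PySem.List.pyGetD nums b 0
    rw [eq_of_beq ha.2, eq_of_beq hb.2]
  · refine (PySem.List.sorted_ofList_pairwise_lt nums).imp_of_mem ?_
    intro v w _ _ hvw a ha b hb
    rw [List.mem_filter] at ha hb
    refine Or.inl ?_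
    show PySem.List.pyGetD nums a 0 < PySem.List.pyGetD nums b 0
    rw [eq_of_beq ha.2, eq_of_beq hb.2]; exact hvw

-- A's output is a permutation of range(len(nums)).
theorem pv_A_perm (nums : List Int) :
    (get_sorted_indexes nums).Perm (PySem.List.pyRange 0 (nums.length : Int) 1) := by
  rw [pv_A_eq_flatMap]
  apply pv_flatMap_filter_perm
  · exact (PySem.List.sorted_perm (PySem.Set.ofList nums) (fun x => x) false).symm.nodup
      (PySem.Set.nodup_ofList nums)
  · intro i hi
    rw [PySem.List.mem_sorted]
    rw [PySem.List.mem_pyRange_one] at hi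
    rw [PySem.List.pyGetD_eq_getElem _ _ hi.1 hi.2]
    have : nums[i.toNat] ∈ nums := List.getElem_mem _
    rw [PySem.Set.mem_ofList]
    exact this

-- ===== VERDICT (by name: the statement is the Claim_ definition above) =====
theorem get_sorted_indexes_spec : Claim_equal_get_sorted_indexes := by
  intro nums _
  unfold Spec_get_sorted_indexes get_sorted_indexes_alt
  apply List.Perm.eq_of_pairwise
      (le := pvLex (fun i => PySem.List.pyGetD nums i 0))
  · intro a b _ _ hab hba
    unfold pvLex at hab hba
    omega
  · exact pv_A_pairwise nums
  · exact pv_sorted_pairwise_lex _ _ (PySem.List.pairwise_lt_pyRange_one 0 (nums.length : Int))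
  · exact (pv_A_perm nums).trans
      (PySem.List.sorted_perm (PySem.List.pyRange 0 (nums.length : Int) 1) _ false).symm
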